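-- pv_equiv track=rewrite | github.com/yon-ninii/Python_Study | 프로그래머스/lv2/12900. 2 x n 타일링/2 x n 타일링.py | solution
-- ===== SOURCE A (Python) =====
-- def solution(n):
--     a, b, answer = 1, 2, 0
--     if n == 1: return 1
--     elif n == 2: return 2
--     for _ in range(n - 2):
--         answer = (a + b) % 1000000007
--         a = b
--         b = answer
--     return answer
-- ===== SOURCE B (Python) =====
-- def solution(n):
--     if n < 1:
--         return 0
--     M = 1000000007
--     def fib_pair(k):
--         # returns (F(k) % M, F(k+1) % M) with F(0)=0, F(1)=1, by fast doubling
--         if k == 0: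
--             return (0, 1)
--         a, b = fib_pair(k // 2)
--         c = a * (2 * b - a) % M
--         d = (a * a + b * b) % M
--         if k % 2 == 0:
--             return (c, d)
--         return (d, (c + d) % M)
--     return fib_pair(n + 1)[0]
-- ===== Notes on version B (the rewrite author's own statement) =====
-- stated objective: faster
-- what changed: Replaces the O(n) iterative Fibonacci loop with an O(log n) fast-doubling recursion on (F(k),F(k+1)) mod 1e9+7.
import Mathlib
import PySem

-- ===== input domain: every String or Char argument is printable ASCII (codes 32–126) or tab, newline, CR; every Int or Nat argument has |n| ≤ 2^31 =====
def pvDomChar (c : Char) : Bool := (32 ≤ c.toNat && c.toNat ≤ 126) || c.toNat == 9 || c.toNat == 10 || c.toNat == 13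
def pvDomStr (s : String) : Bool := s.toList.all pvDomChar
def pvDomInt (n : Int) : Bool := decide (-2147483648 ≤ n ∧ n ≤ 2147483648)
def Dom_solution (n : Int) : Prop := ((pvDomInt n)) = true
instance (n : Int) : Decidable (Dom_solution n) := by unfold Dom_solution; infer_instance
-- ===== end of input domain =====

-- B replaces A's iterative Fibonacci loop by a fast-doubling recursion on pairs (F(k), F(k+1)) mod 1e9+7.

-- ===== PORT A =====
def solution (n : Int) : Int :=
  if n = 1 then 1
  else if n = 2 then 2
  else
    let s := (PySem.List.pyRange 0 (n - 2) 1).foldl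
      (fun (st : Int × Int × Int) _ =>
        let answer := PySem.Int.mod (st.1 + st.2.1) 1000000007
        (st.2.1, answer, answer)) (1, 2, 0)
    s.2.2

-- ===== PORT B =====
-- fast-doubling helper of Source B, (F(k) % M, F(k+1) % M); the Python recursion only ever
-- sees nonnegative k, so its k // 2 and k % 2 are exactly Nat's / and % here
def fibPairB (k : Nat) : Int × Int :=
  if _h : k = 0 then (0, 1)
  else
    let p := fibPairB (k / 2)
    let a := p.1
    let b := p.2
    let c := PySem.Int.mod (a * (2 * b - a)) 1000000007
    let d := PySem.Int.mod (a * a + b * b) 1000000007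
    if k % 2 = 0 then (c, d) else (d, PySem.Int.mod (c + d) 1000000007)
decreasing_by exact Nat.div_lt_self (Nat.pos_of_ne_zero _h) (by omega)

def solution_alt (n : Int) : Int :=
  if n < 1 then 0
  else (fibPairB (n + 1).toNat).1

-- ===== PRECONDITION & SPEC =====
def Spec_solution (n : Int) (out : Int) : Prop := out = solution_alt n
instance (n : Int) (out : Int) : Decidable (Spec_solution n out) := by unfold Spec_solution; infer_instance

-- ===== CLAIM (what is proved, stated in full; the proofs are below) =====
def Claim_equal_solution : Prop := ∀ (n : Int), Dom_solution n → Spec_solution n (solution n)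

-- ===== LEMMAS AND PROOFS =====

def pvM : Int := 1000000007

-- the common value both programs compute: F(k) mod 1e9+7
def pvFm (k : Nat) : Int := (Nat.fib k : Int) % pvM

lemma pvMod_eq (x : Int) : PySem.Int.mod x 1000000007 = x % pvM := by
  rw [PySem.Int.mod_eq_emod_of_pos (by norm_num)]; rfl

lemma pvFm_add (k : Nat) : (pvFm k + pvFm (k + 1)) % pvM = pvFm (k + 2) := by
  unfold pvFm
  rw [← Int.add_emod, Nat.fib_add_two]
  push_cast
  ring_nf

lemma pvFibCast (m : Nat) :
    (Nat.fib (2 * m) : Int) = (Nat.fib m : Int) * (2 * (Nat.fib (m + 1) : Int) - (Nat.fib m : Int)) := by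
  have hle : Nat.fib m ≤ 2 * Nat.fib (m + 1) := le_trans Nat.fib_le_fib_succ (by omega)
  rw [Nat.fib_two_mul, Nat.cast_mul, Nat.cast_sub hle]
  push_cast
  ring

lemma pvDoubleMod (x y : Int) :
    x % pvM * (2 * (y % pvM) - x % pvM) % pvM = x * (2 * y - x) % pvM := by
  have hx : x % pvM ≡ x [ZMOD pvM] := Int.emod_emod_of_dvd x dvd_rfl
  have hy : y % pvM ≡ y [ZMOD pvM] := Int.emod_emod_of_dvd y dvd_rfl
  exact hx.mul (((Int.ModEq.refl 2).mul hy).sub hx)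

lemma pvSquareMod (x y : Int) :
    (x % pvM * (x % pvM) + y % pvM * (y % pvM)) % pvM = (x * x + y * y) % pvM := by
  have hx : x % pvM ≡ x [ZMOD pvM] := Int.emod_emod_of_dvd x dvd_rfl
  have hy : y % pvM ≡ y [ZMOD pvM] := Int.emod_emod_of_dvd y dvd_rfl
  exact (hx.mul hx).add (hy.mul hy)

lemma pvFibC (m : Nat) : pvFm m * (2 * pvFm (m + 1) - pvFm m) % pvM = pvFm (2 * m) := by
  unfold pvFm
  rw [pvDoubleMod, pvFibCast]

lemma pvFibD (m : Nat) : (pvFm m * pvFm m + pvFm (m + 1) * pvFm (m + 1)) % pvM = pvFm (2 * m + 1) := by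
  unfold pvFm
  rw [pvSquareMod, Nat.fib_two_mul_add_one]
  push_cast
  ring_nf

lemma pvFibB (k : Nat) : fibPairB k = (pvFm k, pvFm (k + 1)) := by
  induction k using Nat.strong_induction_on with
  | _ k ih =>
    by_cases h0 : k = 0
    · subst h0; simp [fibPairB]; constructor <;> norm_num [pvFm, pvM]
    · rw [fibPairB, dif_neg h0,
        ih (k / 2) (Nat.div_lt_self (Nat.pos_of_ne_zero h0) (by omega))]
      simp only [pvMod_eq]
      rcases Nat.even_or_odd k with ⟨m, hm⟩ | ⟨m, hm⟩
      · have hk2 : k / 2 = m := by omega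
        have hmod : k % 2 = 0 := by omega
        rw [hk2, if_pos hmod, Prod.mk.injEq]
        have h2m : 2 * m = k := by omega
        exact ⟨by rw [pvFibC, h2m], by rw [pvFibD, h2m]⟩
      · have hk2 : k / 2 = m := by omega
        have hmod : ¬ k % 2 = 0 := by omega
        rw [hk2, if_neg hmod, Prod.mk.injEq]
        have h2m : 2 * m + 1 = k := by omega
        refine ⟨by rw [pvFibD, h2m], ?_⟩
        rw [pvFibC, pvFibD, pvFm_add (2 * m)]
        congr 1
        omega

-- A's loop, generalised: one fold step from a Fibonacci-pair state advances the pair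
lemma pvLoopGen (xs : List Int) : ∀ (x : Int) (j : Nat) (w : Int),
    ((x :: xs).foldl
      (fun (st : Int × Int × Int) _ =>
        let answer := PySem.Int.mod (st.1 + st.2.1) 1000000007
        (st.2.1, answer, answer)) (pvFm (j + 2), pvFm (j + 3), w))
      = (pvFm (xs.length + j + 3), pvFm (xs.length + j + 4), pvFm (xs.length + j + 4)) := by
  induction xs with
  | nil =>
    intro x j w
    simp only [List.foldl_cons, List.foldl_nil, pvMod_eq, List.length_nil]
    rw [pvFm_add (j + 2)]
    simp
  | cons y ys ih =>
    intro x j w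
    simp only [List.foldl_cons, pvMod_eq]
    rw [pvFm_add (j + 2)]
    have := ih y (j + 1) (pvFm (j + 4))
    simp only [List.foldl_cons, pvMod_eq] at this
    rw [show pvFm (j + 4) = pvFm ((j + 1) + 3) from by norm_num, this]
    simp only [List.length_cons]
    refine Prod.ext ?_ (Prod.ext ?_ ?_) <;> · simp only []; congr 1; omega

lemma pvLenRange (b : Nat) : (PySem.List.pyRange 0 (b : Int) 1).length = b := by
  rw [PySem.List.pyRange_zero_natCast]
  simp

-- ===== VERDICT (by name: the statement is the Claim_ definition above) =====
theorem solution_spec : Claim_equal_solution := by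
  intro n _
  unfold Spec_solution solution solution_alt
  by_cases h1 : n = 1
  · subst h1
    rw [if_pos rfl, if_neg (by norm_num), show ((1 : Int) + 1).toNat = 2 from rfl, pvFibB]
    decide
  · by_cases h2 : n = 2
    · subst h2
      rw [if_neg (by norm_num), if_pos rfl, if_neg (by norm_num),
        show ((2 : Int) + 1).toNat = 3 from rfl, pvFibB]
      decide
    · rw [if_neg h1, if_neg h2]
      by_cases h3 : n < 1
      · rw [if_pos h3]
        have he : PySem.List.pyRange 0 (n - 2) 1 = [] := by
          simp [PySem.List.pyRange]; omega
        rw [he]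
        rfl
      · rw [if_neg h3]
        obtain ⟨m, hm1, hm2⟩ : ∃ m : Nat, (n - 2).toNat = m + 1 ∧ (n + 1).toNat = m + 4 :=
          ⟨(n - 3).toNat, by omega, by omega⟩
        have hn2 : n - 2 = (((n - 2).toNat : Nat) : Int) := by omega
        have hlen : (PySem.List.pyRange 0 (n - 2) 1).length = m + 1 := by
          rw [hn2, pvLenRange, hm1]
        obtain ⟨x, xs, hx⟩ : ∃ x xs, PySem.List.pyRange 0 (n - 2) 1 = x :: xs := by
          cases h : PySem.List.pyRange 0 (n - 2) 1 with
          | nil => rw [h] at hlen; simp at hlen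
          | cons x xs => exact ⟨x, xs, rfl⟩
        have hxs : xs.length = m := by rw [hx] at hlen; simpa using hlen
        rw [hx, hm2, pvFibB,
          show ((1 : Int), (2 : Int), (0 : Int)) = (pvFm 2, pvFm 3, (0 : Int)) from by decide,
          show (2 : Nat) = 0 + 2 from rfl, show (3 : Nat) = 0 + 3 from rfl,
          pvLoopGen xs x 0 0, hxs]
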